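-- pv_equiv track=rewrite | github.com/INNODEMS/CBC-Grade-10-Maths | helpers/add_resource_boxes.py | remove_old_resource_boxes
-- ===== SOURCE A (Python) =====
-- def remove_old_resource_boxes(content: str) -> tuple[str, int]:
--     """Remove legacy resource boxes mentioning 'Offline lesson plan'.
--
--     Scans for <axiom> ... </axiom> blocks and drops any block that
--     contains the phrase 'Offline lesson plan' (case-insensitive).
--     """
--
--     phrase = "offline lesson plan"
--     lowered = content.lower()
--     removed = 0
--     pieces: list[str] = []
--     i = 0
--     n = len(content)
--
--     while True:
--         start = content.find("<axiom", i)
--         if start == -1: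
--             # No more axioms; append the rest and stop.
--             pieces.append(content[i:])
--             break
--
--         # Append any text before this axiom.
--         pieces.append(content[i:start])
--
--         end = content.find("</axiom>", start)
--         if end == -1:
--             # Malformed; just append the remainder and stop.
--             pieces.append(content[start:])
--             break
--
--         end_close = end + len("</axiom>")
--         block = content[start:end_close]
--         block_lower = lowered[start:end_close]
--
--         # Decide whether to keep or drop this block.
--         if phrase in block_lower:
--             removed += 1
--
--             # Also skip any immediate trailing whitespace/newlines so we
--             # don't leave large gaps where the box used to be.
--             j = end_close
--             while j < n and content[j] in " \t\r\n":
--                 j += 1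
--             i = j
--         else:
--             pieces.append(block)
--             i = end_close
--
--     return "".join(pieces), removed
-- ===== SOURCE B (Python) =====
-- def remove_old_resource_boxes(content: str) -> tuple[str, int]:
--     """Remove legacy resource boxes mentioning 'Offline lesson plan'.
--
--     Staged-pass algorithm instead of a single find-driven scan:
--     1. collect the positions of every "<axiom" and "</axiom>" marker,
--     2. pair openers with closers by a two-pointer sweep over the two
--        position lists, recording the span (block plus trailing
--        whitespace) of each block that mentions the phrase,
--     3. cut the recorded spans out of the content in one final pass.
--     """
--     phrase = "offline lesson plan"
--     lowered = content.lower()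
--     n = len(content)
--
--     opens = [i for i in range(n) if content.startswith("<axiom", i)]
--     closes = [i + 8 for i in range(n) if content.startswith("</axiom>", i)]
--
--     spans: list[tuple[int, int]] = []
--     removed = 0
--     cursor = 0
--     ci = 0
--     for s in opens:
--         if s < cursor:
--             continue  # opener nested inside an already-paired block
--         while ci < len(closes) and closes[ci] < s + 8:
--             ci += 1
--         if ci == len(closes):
--             break  # unclosed opener: everything from here on is kept
--         e = closes[ci]
--         if phrase in lowered[s:e]:
--             j = e
--             while j < n and content[j] in " \t\r\n":
--                 j += 1
--             spans.append((s, j))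
--             removed += 1
--         cursor = e
--
--     out: list[str] = []
--     pos = 0
--     for a, b in spans:
--         out.append(content[pos:a])
--         pos = b
--     out.append(content[pos:])
--     return "".join(out), removed
-- ===== Notes on version B (the rewrite author's own statement) =====
-- stated objective: alternative
-- what changed: Replaces A's single find-driven scan (interleaved find calls with index bookkeeping) by a staged algorithm: two passes collect all '<axiom' and '</axiom>' marker positions, a two-pointer sweep over the two position lists pairs openers with closers and records the spans of phrase-bearing blocks, and a final pass cuts those spans out of the content.
import Mathlib
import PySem

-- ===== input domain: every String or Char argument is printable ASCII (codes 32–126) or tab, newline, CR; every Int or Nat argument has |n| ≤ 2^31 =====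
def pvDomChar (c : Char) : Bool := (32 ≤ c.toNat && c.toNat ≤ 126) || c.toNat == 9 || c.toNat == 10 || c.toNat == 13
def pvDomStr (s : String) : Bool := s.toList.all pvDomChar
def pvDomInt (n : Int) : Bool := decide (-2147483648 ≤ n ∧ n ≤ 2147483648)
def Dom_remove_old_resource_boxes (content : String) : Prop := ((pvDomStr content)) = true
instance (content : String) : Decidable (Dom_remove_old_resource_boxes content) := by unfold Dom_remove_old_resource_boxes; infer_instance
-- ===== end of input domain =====

-- B replaces A's single find-driven scan by staged passes (collect all marker positions, pair
-- them with a two-pointer sweep, cut the recorded spans); return values proved equal.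

def pvAxOpen : List Char := ['<', 'a', 'x', 'i', 'o', 'm']
def pvAxClose : List Char := ['<', '/', 'a', 'x', 'i', 'o', 'm', '>']
def pvPhrase : List Char := "offline lesson plan".toList
def pvWs : List Char := [' ', '\t', '\r', '\n']

-- the inner `while j < n and content[j] in " \t\r\n": j += 1` loop (textually identical in A and B)
def pvSkipWs (content : List Char) (n : Nat) : Nat → Nat → Nat
  | 0, j => j
  | fuel + 1, j =>
    if j < n ∧ pvWs.contains (content.getD j ' ') then pvSkipWs content n fuel (j + 1) else j

-- ===== PORT A =====
-- A's main `while True` loop over state (i, pieces, removed); fuel = n + 1 is enough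
-- (each iteration strictly increases i ≤ n; the fuel-0 fallback is a totality guard, proved unreachable)
def pvLoopA (content lowered : List Char) (n : Nat) :
    Nat → Nat → List (List Char) → Int → List Char × Int
  | 0, _, pieces, removed => (pieces.flatten, removed)
  | fuel + 1, i, pieces, removed =>
    let st := PySem.Chars.findFrom content pvAxOpen (i : Int)
    if st = -1 then
      (((pieces ++ [PySem.List.slice content (some (i : Int)) none]).flatten), removed)
    else
      let start := st.toNat
      let pieces := pieces ++ [PySem.List.slice content (some (i : Int)) (some (start : Int))]
      let en := PySem.Chars.findFrom content pvAxClose (start : Int)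
      if en = -1 then
        ((pieces ++ [PySem.List.slice content (some (start : Int)) none]).flatten, removed)
      else
        let endClose := en.toNat + 8
        let block := PySem.List.slice content (some (start : Int)) (some (endClose : Int))
        let blockLower := PySem.List.slice lowered (some (start : Int)) (some (endClose : Int))
        if PySem.Chars.isIn pvPhrase blockLower then
          pvLoopA content lowered n fuel (pvSkipWs content n n endClose) pieces (removed + 1)
        else
          pvLoopA content lowered n fuel endClose (pieces ++ [block]) removed

def remove_old_resource_boxes (content : String) : String × Int :=
  let l := content.toList
  let r := pvLoopA l (PySem.Chars.lower l) l.length l.length.succ 0 [] 0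
  (String.ofList r.1, r.2)

-- ===== PORT B =====
-- the inner `while ci < len(closes) and closes[ci] < s + 8: ci += 1` pointer advance, the
-- pointer into `closes` rendered as the remaining suffix of the list (exact)
def pvCsAdvance : List Nat → Nat → List Nat
  | [], _ => []
  | c :: cs, b => if c < b then pvCsAdvance cs b else c :: cs

-- B's `for s in opens` pairing loop over state (cs-suffix, cursor, spans, removed);
-- `continue` = first branch, `break` = the [] case of the advanced closer suffix
def pvAltLoop (l low : List Char) (n : Nat) :
    List Nat → List Nat → Nat → List (Nat × Nat) → Int → List (Nat × Nat) × Int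
  | [], _, _, spans, removed => (spans, removed)
  | s :: rest, cs, cursor, spans, removed =>
    if s < cursor then pvAltLoop l low n rest cs cursor spans removed
    else
      match pvCsAdvance cs (s + 8) with
      | [] => (spans, removed)
      | e :: cs' =>
        if PySem.Chars.isIn pvPhrase (PySem.List.slice low (some (s : Int)) (some (e : Int))) then
          pvAltLoop l low n rest (e :: cs') e (spans ++ [(s, pvSkipWs l n n e)]) (removed + 1)
        else
          pvAltLoop l low n rest (e :: cs') e spans removed

-- `[i for i in range(n) if content.startswith(p, i)]` ported as a filter of List.range n
-- (exact: n ≥ 0 and startswith at a nonnegative offset is List.IsPrefixOf on the drop)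
def remove_old_resource_boxes_alt (content : String) : String × Int :=
  let l := content.toList
  let low := PySem.Chars.lower l
  let n := l.length
  let opens := (List.range n).filter (fun i => pvAxOpen.isPrefixOf (l.drop i))
  let closes := ((List.range n).filter (fun i => pvAxClose.isPrefixOf (l.drop i))).map (fun i => i + 8)
  let sr := pvAltLoop l low n opens closes 0 [] 0
  let op := sr.1.foldl (fun (acc : List (List Char) × Nat) ab =>
      (acc.1 ++ [PySem.List.slice l (some (acc.2 : Int)) (some (ab.1 : Int))], ab.2)) ([], 0)
  (String.ofList ((op.1 ++ [PySem.List.slice l (some (op.2 : Int)) none]).flatten), sr.2)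

-- ===== PRECONDITION & SPEC =====
def Spec_remove_old_resource_boxes (content : String) (out : String × Int) : Prop := out = remove_old_resource_boxes_alt content
instance (content : String) (out : String × Int) : Decidable (Spec_remove_old_resource_boxes content out) := by unfold Spec_remove_old_resource_boxes; infer_instance

-- ===== CLAIM (what is proved, stated in full; the proofs are below) =====
def Claim_equal_remove_old_resource_boxes : Prop := ∀ (content : String), Dom_remove_old_resource_boxes content → Spec_remove_old_resource_boxes content (remove_old_resource_boxes content)

-- ===== LEMMAS AND PROOFS =====

-- the cut of a span list out of l, starting at pos (proof-side normal form of both outputs)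
def pvCut (l : List Char) : List (Nat × Nat) → Nat → List Char
  | [], pos => l.drop pos
  | (a, b) :: rest, pos => PySem.List.slice l (some (pos : Int)) (some (a : Int)) ++ pvCut l rest b

theorem pvFind_spec (s p : List Char) (h : PySem.Chars.find s p ≠ -1) :
    0 ≤ PySem.Chars.find s p ∧ p <+: s.drop (PySem.Chars.find s p).toNat ∧
      ∀ i < (PySem.Chars.find s p).toNat, ¬ p <+: s.drop i := by
  have := PySem.Chars.findFrom_natCast_spec s p 0 (Nat.zero_le _)
  rw [Nat.cast_zero, PySem.Chars.findFrom_zero] at this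
  have h2 := this h
  exact ⟨by exact_mod_cast h2.1, h2.2.1, fun i hi => h2.2.2 i (Nat.zero_le _) hi⟩

theorem pvFindAbs_neg (l p : List Char) (i : Nat)
    (h : PySem.Chars.find (l.drop i) p = -1) :
    ∀ m, i ≤ m → ¬ p <+: l.drop m := by
  intro m him hp
  rw [PySem.Chars.find_eq_neg_one_iff] at h
  have hd : l.drop m = (l.drop i).drop (m - i) := by
    rw [List.drop_drop]; congr 1; omega
  exact h (((hd ▸ hp).isInfix).trans (List.drop_suffix _ _).isInfix)

theorem pvFindAbs_pos (l p : List Char) (i : Nat)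
    (h : PySem.Chars.find (l.drop i) p ≠ -1) :
    p <+: l.drop (i + (PySem.Chars.find (l.drop i) p).toNat) ∧
      ∀ m, i ≤ m → m < i + (PySem.Chars.find (l.drop i) p).toNat → ¬ p <+: l.drop m := by
  obtain ⟨h0, hpre, hmin⟩ := pvFind_spec (l.drop i) p h
  constructor
  · rwa [List.drop_drop] at hpre
  · intro m h1 h2 hp
    apply hmin (m - i) (by omega)
    rw [List.drop_drop, show i + (m - i) = m by omega]
    exact hp

theorem pvCsAdvance_eq (cs : List Nat) (b : Nat) :
    pvCsAdvance cs b = cs.dropWhile (fun c => c < b) := by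
  induction cs with
  | nil => rfl
  | cons c cs ih => simp only [pvCsAdvance, List.dropWhile_cons, decide_eq_true_eq]; split <;> simp [ih]

theorem pvDwMem (b : Nat) (cs : List Nat) (hs : cs.Pairwise (· < ·)) (x : Nat) :
    x ∈ cs.dropWhile (fun c => c < b) ↔ x ∈ cs ∧ b ≤ x := by
  induction cs with
  | nil => simp
  | cons c cs ih =>
    rw [List.pairwise_cons] at hs
    by_cases hc : c < b
    · rw [List.dropWhile_cons_of_pos (by simpa using hc), ih hs.2]
      constructor
      · rintro ⟨h1, h2⟩; exact ⟨List.mem_cons_of_mem _ h1, h2⟩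
      · rintro ⟨h1, h2⟩
        rcases List.mem_cons.mp h1 with rfl | h1
        · omega
        · exact ⟨h1, h2⟩
    · rw [List.dropWhile_cons_of_neg (by simpa using hc)]
      constructor
      · intro h1
        refine ⟨h1, ?_⟩
        rcases List.mem_cons.mp h1 with rfl | h1
        · omega
        · have := hs.1 x h1; omega
      · exact fun h => h.1

theorem pvDwSorted (b : Nat) (cs : List Nat) (hs : cs.Pairwise (· < ·)) :
    (cs.dropWhile (fun c => c < b)).Pairwise (· < ·) :=
  hs.sublist (List.dropWhile_sublist _)

theorem pvAltLoop_dropWhile (l low : List Char) (n : Nat) (os : List Nat) :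
    ∀ (cs : List Nat) (cursor : Nat) (spans : List (Nat × Nat)) (removed : Int),
    pvAltLoop l low n os cs cursor spans removed
      = pvAltLoop l low n (os.dropWhile (fun s => s < cursor)) cs cursor spans removed := by
  induction os with
  | nil => intro _ _ _ _; rfl
  | cons s rest ih =>
    intro cs cursor spans removed
    by_cases hc : s < cursor
    · rw [List.dropWhile_cons_of_pos (by simpa using hc), pvAltLoop, if_pos hc, ih]
    · rw [List.dropWhile_cons_of_neg (by simpa using hc)]

theorem pvAlt_affine (l low : List Char) (n : Nat) (os : List Nat) :
    ∀ (cs : List Nat) (cursor : Nat) (spans : List (Nat × Nat)) (removed : Int),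
    pvAltLoop l low n os cs cursor spans removed
      = (spans ++ (pvAltLoop l low n os cs cursor [] 0).1,
         removed + (pvAltLoop l low n os cs cursor [] 0).2) := by
  induction os with
  | nil => intro _ _ _ _; simp [pvAltLoop]
  | cons s rest ih =>
    intro cs cursor spans removed
    rw [pvAltLoop, pvAltLoop]
    by_cases hc : s < cursor
    · rw [if_pos hc, if_pos hc, ih, ih cs cursor [] 0]
    · rw [if_neg hc, if_neg hc]
      cases hadv : pvCsAdvance cs (s + 8) with
      | nil => simp
      | cons e cs' =>
        dsimp only
        by_cases hph : PySem.Chars.isIn pvPhrase (PySem.List.slice low (some (s : Int)) (some (e : Int))) = true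
        · rw [if_pos hph, if_pos hph]
          simp only [List.nil_append, zero_add]
          rw [ih, ih (e :: cs') e [(s, pvSkipWs l n n e)] 1]
          rw [Prod.mk.injEq]
          exact ⟨by simp [List.append_assoc], by omega⟩
        · rw [if_neg hph, if_neg hph, ih, ih (e :: cs') e [] 0]

theorem pvCsAdvance_head (cs : List Nat) (b e : Nat) (cs' : List Nat)
    (h : pvCsAdvance cs b = e :: cs') : b ≤ e := by
  induction cs with
  | nil => simp [pvCsAdvance] at h
  | cons c cst ih =>
    rw [pvCsAdvance] at h
    split at h
    · exact ih h
    · rename_i hc; cases h; omega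

theorem pvAlt_spans_ge (l low : List Char) (n : Nat) (os : List Nat) :
    ∀ (cs : List Nat) (cursor : Nat) (p : Nat × Nat),
    p ∈ (pvAltLoop l low n os cs cursor [] 0).1 → cursor ≤ p.1 := by
  induction os with
  | nil => intro _ _ p hp; simp [pvAltLoop] at hp
  | cons s rest ih =>
    intro cs cursor p hp
    rw [pvAltLoop] at hp
    by_cases hc : s < cursor
    · rw [if_pos hc] at hp; exact ih cs cursor p hp
    · rw [if_neg hc] at hp
      cases hadv : pvCsAdvance cs (s + 8) with
      | nil => rw [hadv] at hp; simp at hp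
      | cons e cs' =>
        rw [hadv] at hp
        dsimp only at hp
        have he : s + 8 ≤ e := pvCsAdvance_head cs (s + 8) e cs' hadv
        split at hp
        · rw [pvAlt_affine] at hp
          simp only [List.nil_append, List.singleton_append, List.mem_cons] at hp
          rcases hp with rfl | hp
          · omega
          · have := ih (e :: cs') e p hp; omega
        · have := ih (e :: cs') e p hp; omega

theorem pvCut_split (l : List Char) (spans : List (Nat × Nat)) (i e : Nat)
    (hie : i ≤ e) (hsp : ∀ p ∈ spans, e ≤ p.1) :
    pvCut l spans i = (l.drop i).take (e - i) ++ pvCut l spans e := by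
  cases spans with
  | nil =>
    show l.drop i = (l.drop i).take (e - i) ++ l.drop e
    rw [show l.drop e = (l.drop i).drop (e - i) by rw [List.drop_drop]; congr 1; omega,
      List.take_append_drop]
  | cons ab rest =>
    obtain ⟨a, b⟩ := ab
    have hea : e ≤ a := hsp (a, b) List.mem_cons_self
    show PySem.List.slice l (some (i : Int)) (some (a : Int)) ++ pvCut l rest b
      = (l.drop i).take (e - i) ++ (PySem.List.slice l (some (e : Int)) (some (a : Int)) ++ pvCut l rest b)
    rw [PySem.List.slice_natCast, PySem.List.slice_natCast, ← List.append_assoc]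
    congr 1
    rw [show a - i = (e - i) + (a - e) by omega, List.take_add]
    congr 2
    rw [List.drop_drop]; congr 1; omega

theorem pvFold_cut (l : List Char) (spans : List (Nat × Nat)) :
    ∀ (acc : List (List Char)) (pos : Nat),
    ((spans.foldl (fun (acc : List (List Char) × Nat) ab =>
        (acc.1 ++ [PySem.List.slice l (some (acc.2 : Int)) (some (ab.1 : Int))], ab.2)) (acc, pos)).1
      ++ [PySem.List.slice l
            (some (((spans.foldl (fun (acc : List (List Char) × Nat) ab =>
              (acc.1 ++ [PySem.List.slice l (some (acc.2 : Int)) (some (ab.1 : Int))], ab.2)) (acc, pos)).2 : Nat) : Int)) none]).flatten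
      = acc.flatten ++ pvCut l spans pos := by
  induction spans with
  | nil =>
    intro acc pos
    simp [pvCut, PySem.List.slice_from_natCast]
  | cons ab rest ih =>
    intro acc pos
    obtain ⟨a, b⟩ := ab
    simp only [List.foldl_cons]
    rw [ih (acc ++ [PySem.List.slice l (some (pos : Int)) (some (a : Int))]) b]
    simp [pvCut, List.append_assoc]

-- an opener cannot start inside the skipped-whitespace region [E, E + |takeWhile ws|)
theorem pvNoOpenInWs (l : List Char) (E m : Nat) (hm1 : E ≤ m)
    (hm2 : m < E + ((l.drop E).takeWhile (fun c => pvWs.contains c)).length) :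
    ¬ pvAxOpen <+: l.drop m := by
  intro hp
  set t := (l.drop E).takeWhile (fun c => pvWs.contains c) with ht
  have htpre : t <+: l.drop E := List.takeWhile_prefix _
  have hlen : t.length ≤ (l.drop E).length := htpre.length_le
  have hmn : m < l.length := by
    rw [List.length_drop] at hlen; omega
  have hget : l.drop m = l[m] :: l.drop (m + 1) := List.drop_eq_getElem_cons hmn
  have hlt : l[m] = '<' := by
    have h := hp
    rw [hget] at h
    simp only [pvAxOpen, List.cons_prefix_cons] at h
    exact h.1.symm
  have hidx : m - E < t.length := by omega
  have h1 : t[m - E] = (l.drop E)[m - E]'(by omega) := htpre.getElem hidx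
  have h2 : (l.drop E)[m - E]'(by omega) = l[m]'(hmn) := by
    rw [List.getElem_drop]; congr 1; omega
  have hmem : t[m - E] ∈ t := List.getElem_mem hidx
  have hws : pvWs.contains (t[m - E]) = true := List.mem_takeWhile_imp hmem
  rw [h1, h2, hlt] at hws
  simp [pvWs] at hws

theorem pvSkipWs_spec (l : List Char) (fuel j : Nat) (hf : l.length - j ≤ fuel) :
    pvSkipWs l l.length fuel j = j + ((l.drop j).takeWhile (fun c => pvWs.contains c)).length := by
  induction fuel generalizing j with
  | zero =>
    rw [List.drop_eq_nil_of_le (by omega)]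
    simp [pvSkipWs]
  | succ fuel ihw =>
    rw [pvSkipWs]
    split
    · rename_i h
      rw [ihw (j + 1) (by omega)]
      have hdrop : l.drop j = l[j]'(h.1) :: l.drop (j + 1) := List.drop_eq_getElem_cons h.1
      have hc : pvWs.contains (l[j]'(h.1)) = true := by
        rw [← List.getD_eq_getElem l ' ' h.1]; exact h.2
      rw [hdrop, List.takeWhile_cons, hc]
      simp; omega
    · rename_i h
      by_cases hj : j < l.length
      · have hc : pvWs.contains (l[j]'hj) = false := by
          rw [← List.getD_eq_getElem l ' ' hj]
          by_contra hcc
          exact h ⟨hj, by simpa using hcc⟩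
        rw [List.drop_eq_getElem_cons hj, List.takeWhile_cons, hc]
        simp
      · rw [List.drop_eq_nil_of_le (by omega)]
        simp

theorem pvMainLoop (l : List Char) (fuel : Nat) :
    ∀ (i cursor : Nat) (os cs : List Nat) (pieces : List (List Char)) (removed : Int),
    cursor ≤ i → i ≤ l.length →
    os.Pairwise (· < ·) → cs.Pairwise (· < ·) →
    (∀ s ∈ os, pvAxOpen <+: l.drop s) →
    (∀ c ∈ cs, 8 ≤ c ∧ pvAxClose <+: l.drop (c - 8)) →
    (∀ m, i ≤ m → pvAxOpen <+: l.drop m → m ∈ os) →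
    (∀ m, pvAxClose <+: l.drop m → cursor ≤ m + 8 → m + 8 ∈ cs) →
    (∀ m, cursor ≤ m → m < i → ¬ pvAxOpen <+: l.drop m) →
    l.length - i < fuel →
    pvLoopA l (PySem.Chars.lower l) l.length fuel i pieces removed
      = (pieces.flatten
          ++ pvCut l (pvAltLoop l (PySem.Chars.lower l) l.length os cs cursor [] 0).1 i,
         removed + (pvAltLoop l (PySem.Chars.lower l) l.length os cs cursor [] 0).2) := by
  induction fuel with
  | zero => intro i _ _ _ _ _ _ hi _ _ _ _ _ _ _ hf; omega
  | succ fa ih =>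
    intro i cursor os cs pieces removed hci hi hosS hcsS hosO hcsC hosAll hcsAll hNoOpen hf
    rw [pvAltLoop_dropWhile, pvLoopA, PySem.Chars.findFrom_natCast l pvAxOpen i hi]
    set os' := os.dropWhile (fun s => s < cursor) with hos'
    have hos'mem : ∀ x, x ∈ os' ↔ x ∈ os ∧ cursor ≤ x := by
      intro x
      rw [hos', show (fun s => decide (s < cursor)) = (fun s : Nat => s < cursor) from rfl]
      exact pvDwMem cursor os hosS x
    have hos'S : os'.Pairwise (· < ·) := pvDwSorted cursor os hosS
    dsimp only
    by_cases hopen : PySem.Chars.find (l.drop i) pvAxOpen = -1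
    · -- A: no opener at or after i; B: os' must be empty
      cases hos'' : os' with
      | nil =>
        simp only [pvAltLoop, hopen, pvCut,
          PySem.List.slice_from_natCast]
        simp
      | cons s rest =>
        exfalso
        have hs := (hos'mem s).mp (hos'' ▸ List.mem_cons_self)
        have hsO := hosO s hs.1
        have hsi : i ≤ s := by
          by_contra hlt
          exact hNoOpen s hs.2 (by omega) hsO
        exact pvFindAbs_neg l pvAxOpen i hopen s hsi hsO
    · obtain ⟨hpre, hmin⟩ := pvFindAbs_pos l pvAxOpen i hopen
      set k := (PySem.Chars.find (l.drop i) pvAxOpen).toNat with hk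
      have h0 : 0 ≤ PySem.Chars.find (l.drop i) pvAxOpen := (pvFind_spec _ _ hopen).1
      have hkv : PySem.Chars.find (l.drop i) pvAxOpen = (k : Int) := by omega
      have hstartO : pvAxOpen <+: l.drop (i + k) := hpre
      have hstartn : i + k + 6 ≤ l.length := by
        have := hstartO.length_le
        rw [List.length_drop] at this
        simp [pvAxOpen] at this
        omega
      -- B's head opener is exactly start
      cases hos'' : os' with
      | nil =>
        exfalso
        have : i + k ∈ os' := (hos'mem (i + k)).mpr ⟨hosAll (i + k) (by omega) hstartO, by omega⟩
        rw [hos''] at this; simp at this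
      | cons s rest =>
        have hsmem := (hos'mem s).mp (hos'' ▸ List.mem_cons_self)
        have hsO := hosO s hsmem.1
        have hsi : i ≤ s := by
          by_contra hlt
          exact hNoOpen s hsmem.2 (by omega) hsO
        have hsgestart : i + k ≤ s := by
          by_contra hlt
          exact hmin s hsi (by omega) hsO
        have hseq : s = i + k := by
          have hmemstart : i + k ∈ os' := (hos'mem (i + k)).mpr ⟨hosAll (i + k) (by omega) hstartO, by omega⟩
          rw [hos''] at hmemstart
          rcases List.mem_cons.mp hmemstart with h | h
          · omega
          · have := (hos'' ▸ hos'S)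
            rw [List.pairwise_cons] at this
            have := this.1 (i + k) h
            omega
        have hsO' : pvAxOpen <+: l.drop s := hsO
        have hsn : s + 6 ≤ l.length := by omega
        -- unfold B one step
        rw [pvAltLoop, if_neg (by omega : ¬ s < cursor)]
        -- unfold A: opener found
        rw [if_neg hopen, hkv,
          show ((i : Int) + (k : Int)) = ((s : Nat) : Int) by rw [hseq]; push_cast; ring]
        rw [if_neg (by omega : ¬ ((s : Nat) : Int) = -1), Int.toNat_natCast]
        rw [PySem.Chars.findFrom_natCast l pvAxClose s (by omega)]
        by_cases hclose : PySem.Chars.find (l.drop s) pvAxClose = -1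
        · -- A: malformed (no closer from s on); B: advanced closer list must be empty
          cases hadv : pvCsAdvance cs (s + 8) with
          | cons e cs' =>
            exfalso
            have he8 : s + 8 ≤ e := pvCsAdvance_head cs (s + 8) e cs' hadv
            have hemem : e ∈ cs := by
              have : e ∈ pvCsAdvance cs (s + 8) := hadv ▸ List.mem_cons_self
              rw [pvCsAdvance_eq] at this
              exact ((pvDwMem (s + 8) cs hcsS e).mp (by simpa using this)).1
            obtain ⟨he8', heC⟩ := hcsC e hemem
            exact pvFindAbs_neg l pvAxClose s hclose (e - 8) (by omega) heC
          | nil =>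
            simp only [hclose, if_true, pvCut, PySem.List.slice_from_natCast]
            rw [Prod.mk.injEq]
            constructor
            · rw [PySem.List.slice_natCast]
              simp only [List.flatten_append, List.flatten_cons, List.flatten_nil,
                List.append_nil, List.append_assoc]
              congr 1
              rw [show l.drop s = (l.drop i).drop (s - i) by rw [List.drop_drop]; congr 1; omega,
                List.take_append_drop]
            · simp
        · obtain ⟨hcpre, hcmin⟩ := pvFindAbs_pos l pvAxClose s hclose
          set g := (PySem.Chars.find (l.drop s) pvAxClose).toNat with hg
          have hc0 : 0 ≤ PySem.Chars.find (l.drop s) pvAxClose := (pvFind_spec _ _ hclose).1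
          have hgv : PySem.Chars.find (l.drop s) pvAxClose = (g : Int) := by omega
          set E := s + g + 8 with hE
          have hEn : E ≤ l.length := by
            have := hcpre.length_le
            rw [List.length_drop] at this
            simp [pvAxClose] at this
            omega
          -- B's paired closer end is exactly E
          have hEmem : E ∈ cs := by
            have := hcsAll (s + g) hcpre (by omega)
            simpa [hE] using this
          have hEadv : E ∈ pvCsAdvance cs (s + 8) := by
            rw [pvCsAdvance_eq]
            exact (pvDwMem (s + 8) cs hcsS E).mpr ⟨hEmem, by omega⟩
          cases hadv : pvCsAdvance cs (s + 8) with
          | nil => exfalso; rw [hadv] at hEadv; simp at hEadv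
          | cons e cs' =>
            have he8 : s + 8 ≤ e := pvCsAdvance_head cs (s + 8) e cs' hadv
            have hemem : e ∈ cs := by
              have : e ∈ pvCsAdvance cs (s + 8) := hadv ▸ List.mem_cons_self
              rw [pvCsAdvance_eq] at this
              exact ((pvDwMem (s + 8) cs hcsS e).mp this).1
            obtain ⟨he8', heC⟩ := hcsC e hemem
            have heE : e = E := by
              have hge : E ≤ e := by
                by_contra hlt
                exact hcmin (e - 8) (by omega) (by omega) heC
              rw [hadv] at hEadv
              rcases List.mem_cons.mp hEadv with h | h
              · omega
              · have hadvS : (e :: cs').Pairwise (· < ·) := by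
                  rw [← hadv, pvCsAdvance_eq]
                  exact pvDwSorted (s + 8) cs hcsS
                rw [List.pairwise_cons] at hadvS
                have := hadvS.1 E h
                omega
            subst heE
            -- A: closer found; normalize the Int arithmetic
            rw [if_neg hclose, hgv,
              show ((s : Nat) : Int) + ((g : Nat) : Int) = (((s + g : Nat)) : Int) by push_cast; ring,
              if_neg (by omega : ¬ (((s + g : Nat)) : Int) = -1), Int.toNat_natCast]
            have hEarith : (s + g) + 8 = E := by omega
            rw [hEarith]
            dsimp only
            simp only [List.nil_append, zero_add]
            -- both phrase conditions are now the same slice of the lowered text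
            by_cases hph : PySem.Chars.isIn pvPhrase
                (PySem.List.slice (PySem.Chars.lower l) (some ((s : Nat) : Int)) (some ((E : Nat) : Int))) = true
            · rw [if_pos hph, if_pos hph]
              -- removed: A skips trailing whitespace to j, B records the span (s, j)
              set j := pvSkipWs l l.length l.length E with hj
              have hjspec : j = E + ((l.drop E).takeWhile (fun c => pvWs.contains c)).length :=
                pvSkipWs_spec l l.length E (by omega)
              have hjn : j ≤ l.length := by
                have := (List.takeWhile_prefix (l := l.drop E) (fun c => pvWs.contains c)).length_le
                rw [List.length_drop] at this
                omega
              have hEj : E ≤ j := by omega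
              rw [pvAlt_affine l (PySem.Chars.lower l) l.length rest (E :: cs') E
                [(s, pvSkipWs l l.length l.length E)] 1]
              rw [ih j E rest (E :: cs') (pieces ++ [PySem.List.slice l (some (i : Int)) (some ((s : Nat) : Int))]) (removed + 1)
                (by omega) (by omega)
                (by have := hos'' ▸ hos'S; exact (List.pairwise_cons.mp this).2)
                (by rw [← hadv, pvCsAdvance_eq]; exact pvDwSorted (s + 8) cs hcsS)
                (fun x hx => hosO x ((hos'mem x).mp (hos'' ▸ List.mem_cons_of_mem s hx)).1)
                (fun c hc => hcsC c (by
                  have : c ∈ pvCsAdvance cs (s + 8) := hadv ▸ hc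
                  rw [pvCsAdvance_eq] at this
                  exact ((pvDwMem (s + 8) cs hcsS c).mp this).1))
                (by
                  intro m hm hmO
                  have hmos : m ∈ os := hosAll m (by omega) hmO
                  have hmos' : m ∈ os' := (hos'mem m).mpr ⟨hmos, by omega⟩
                  rw [hos''] at hmos'
                  rcases List.mem_cons.mp hmos' with rfl | h
                  · omega
                  · exact h)
                (by
                  intro m hmC hm8
                  have : m + 8 ∈ cs := hcsAll m hmC (by omega)
                  have : m + 8 ∈ pvCsAdvance cs (s + 8) := by
                    rw [pvCsAdvance_eq]
                    exact (pvDwMem (s + 8) cs hcsS (m + 8)).mpr ⟨this, by omega⟩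
                  rw [hadv] at this
                  exact this)
                (by
                  intro m hm1 hm2
                  exact pvNoOpenInWs l E m hm1 (by omega))
                (by omega)]
              rw [← hj]
              rw [Prod.mk.injEq]
              constructor
              · show _ = pieces.flatten ++ pvCut l ((s, j) :: _) i
                rw [pvCut]
                simp only [List.flatten_append, List.flatten_cons, List.flatten_nil,
                  List.append_nil, List.append_assoc]
                simp
              · show removed + 1 + _ = removed + (1 + _)
                omega
            · rw [if_neg hph, if_neg hph]
              -- kept: A emits the block, B leaves no span; the two contiguous pieces merge
              rw [ih E E rest (E :: cs')
                ((pieces ++ [PySem.List.slice l (some (i : Int)) (some ((s : Nat) : Int))])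
                  ++ [PySem.List.slice l (some ((s : Nat) : Int)) (some ((E : Nat) : Int))]) removed
                (by omega) (by omega)
                (by have := hos'' ▸ hos'S; exact (List.pairwise_cons.mp this).2)
                (by rw [← hadv, pvCsAdvance_eq]; exact pvDwSorted (s + 8) cs hcsS)
                (fun x hx => hosO x ((hos'mem x).mp (hos'' ▸ List.mem_cons_of_mem s hx)).1)
                (fun c hc => hcsC c (by
                  have : c ∈ pvCsAdvance cs (s + 8) := hadv ▸ hc
                  rw [pvCsAdvance_eq] at this
                  exact ((pvDwMem (s + 8) cs hcsS c).mp this).1))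
                (by
                  intro m hm hmO
                  have hmos : m ∈ os := hosAll m (by omega) hmO
                  have hmos' : m ∈ os' := (hos'mem m).mpr ⟨hmos, by omega⟩
                  rw [hos''] at hmos'
                  rcases List.mem_cons.mp hmos' with rfl | h
                  · omega
                  · exact h)
                (by
                  intro m hmC hm8
                  have : m + 8 ∈ cs := hcsAll m hmC (by omega)
                  have : m + 8 ∈ pvCsAdvance cs (s + 8) := by
                    rw [pvCsAdvance_eq]
                    exact (pvDwMem (s + 8) cs hcsS (m + 8)).mpr ⟨this, by omega⟩
                  rw [hadv] at this
                  exact this)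
                (by intro m hm1 hm2; omega)
                (by omega)]
              rw [Prod.mk.injEq]
              constructor
              · rw [pvCut_split l _ i E (by omega)
                  (fun p hp => pvAlt_spans_ge l (PySem.Chars.lower l) l.length rest (E :: cs') E p hp)]
                simp only [List.flatten_append, List.flatten_cons, List.flatten_nil,
                  List.append_nil]
                rw [PySem.List.slice_natCast, PySem.List.slice_natCast,
                  show E - i = (s - i) + (E - s) by omega, List.take_add,
                  show (List.drop i l).drop (s - i) = List.drop s l by
                    rw [List.drop_drop]; congr 1; omega]
                simp [List.append_assoc]
              · rfl

-- ===== VERDICT (by name: the statement is the Claim_ definition above) =====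
theorem remove_old_resource_boxes_spec : Claim_equal_remove_old_resource_boxes := by
  intro content _
  unfold Spec_remove_old_resource_boxes remove_old_resource_boxes remove_old_resource_boxes_alt
  dsimp only
  set l := content.toList with hl
  have hmain := pvMainLoop l l.length.succ 0 0
    ((List.range l.length).filter (fun i => pvAxOpen.isPrefixOf (l.drop i)))
    (((List.range l.length).filter (fun i => pvAxClose.isPrefixOf (l.drop i))).map (fun i => i + 8))
    [] 0 (le_refl 0) (Nat.zero_le _)
    (List.pairwise_lt_range.filter _)
    ((List.pairwise_lt_range.filter _).map _ (by intro a b h; omega))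
    (by
      intro s hs
      rw [List.mem_filter] at hs
      exact (by simpa using hs.2))
    (by
      intro c hc
      rw [List.mem_map] at hc
      obtain ⟨m, hm, rfl⟩ := hc
      rw [List.mem_filter] at hm
      refine ⟨by omega, ?_⟩
      rw [show m + 8 - 8 = m by omega]
      exact (by simpa using hm.2))
    (by
      intro m _ hmO
      have hmn : m < l.length := by
        have := hmO.length_le
        rw [List.length_drop] at this
        simp [pvAxOpen] at this
        omega
      rw [List.mem_filter, List.mem_range]
      exact ⟨hmn, by simpa using hmO⟩)
    (by
      intro m hmC _
      have hmn : m < l.length := by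
        have := hmC.length_le
        rw [List.length_drop] at this
        simp [pvAxClose] at this
        omega
      rw [List.mem_map]
      exact ⟨m, by
        rw [List.mem_filter, List.mem_range]
        exact ⟨hmn, by simpa using hmC⟩, rfl⟩)
    (by intro m _ hm; omega)
    (by omega)
  simp only [hmain, List.flatten_nil, List.nil_append, zero_add]
  rw [Prod.mk.injEq]
  constructor
  · congr 1
    rw [pvFold_cut l _ [] 0]
    simp
  · rfl
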